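-- pv_equiv track=rewrite | github.com/HongyiZhouCN/wandb2numpy | metaworld_50envs/metaworld_50envs.py | convert_task_id_gsde
-- ===== SOURCE A (Python) =====
-- def convert_task_id_gsde(input_str):
--     output_str = []
--     for i, char in enumerate(input_str):
--         if char.isupper():
--             if i != 0:
--                 output_str.append('-')
--             output_str.append(char.lower())
--         else:
--             output_str.append(char)
--     return ''.join(output_str) + "-v2"
-- ===== SOURCE B (Python) =====
-- def convert_task_id_gsde(input_str):
--     # Group the string into segments: a new segment starts at every uppercase
--     # letter after position 0.  Lowercase each segment's first character and
--     # join the segments with '-'.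
--     segments = []
--     cur = input_str[:1]
--     for c in input_str[1:]:
--         if c.isupper():
--             segments.append(cur)
--             cur = c
--         else:
--             cur += c
--     segments.append(cur)
--     return '-'.join(s[:1].lower() + s[1:] for s in segments) + '-v2'
-- ===== Notes on version B (the rewrite author's own statement) =====
-- stated objective: alternative
-- what changed: B groups the string into camelCase segments with a running current-segment accumulator and then joins the lowercased-first-character segments with '-', instead of A's per-character emit of '-' plus lowered char into one flat list.
import Mathlib
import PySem

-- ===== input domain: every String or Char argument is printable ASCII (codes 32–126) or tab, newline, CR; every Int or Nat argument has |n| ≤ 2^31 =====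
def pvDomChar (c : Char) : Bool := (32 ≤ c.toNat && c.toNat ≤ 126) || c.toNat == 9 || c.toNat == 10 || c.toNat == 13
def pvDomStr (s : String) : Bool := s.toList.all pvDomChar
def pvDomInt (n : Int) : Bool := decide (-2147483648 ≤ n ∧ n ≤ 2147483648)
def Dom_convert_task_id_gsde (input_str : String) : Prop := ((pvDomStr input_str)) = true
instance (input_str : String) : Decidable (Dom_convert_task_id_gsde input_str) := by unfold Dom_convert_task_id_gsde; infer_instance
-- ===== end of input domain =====

-- B groups the string into camelCase segments and joins them with '-', instead of A's
-- per-character emission; objective: alternative decomposition, same cost.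

-- ===== PORT A =====
-- A: for each (i, char): if upper, emit '-' (unless i == 0) then the lowered char, else the char; join and add "-v2".
def convert_task_id_gsde (input_str : String) : String :=
  let output_str : List Char :=
    (PySem.List.enumerate input_str.toList).foldl
      (fun acc p =>
        if PySem.Chars.isupper p.2 then
          (if p.1 ≠ 0 then acc ++ ['-'] else acc) ++ [PySem.Chars.lowerChar p.2]
        else acc ++ [p.2]) []
  String.mk (output_str ++ ['-', 'v', '2'])

-- ===== PORT B =====
-- s[:1].lower() + s[1:]
def pvTf (s : List Char) : List Char :=
  PySem.Chars.lower (PySem.Chars.slice s none (some 1)) ++ PySem.Chars.slice s (some 1) none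

-- the loop body of B: start a new segment at an uppercase char, else extend the current one
def pvStep (st : List (List Char) × List Char) (c : Char) : List (List Char) × List Char :=
  if PySem.Chars.isupper c then (st.1 ++ [st.2], [c]) else (st.1, st.2 ++ [c])

def convert_task_id_gsde_alt (input_str : String) : String :=
  let cs := input_str.toList
  let st := (PySem.Chars.slice cs (some 1) none).foldl pvStep
              ([], PySem.Chars.slice cs none (some 1))
  let segments := st.1 ++ [st.2]
  String.mk (PySem.Chars.join ['-'] (segments.map pvTf) ++ ['-', 'v', '2'])

-- ===== PRECONDITION & SPEC =====
def Spec_convert_task_id_gsde (input_str : String) (out : String) : Prop := out = convert_task_id_gsde_alt input_str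
instance (input_str : String) (out : String) : Decidable (Spec_convert_task_id_gsde input_str out) := by unfold Spec_convert_task_id_gsde; infer_instance

-- ===== CLAIM (what is proved, stated in full; the proofs are below) =====
def Claim_equal_convert_task_id_gsde : Prop := ∀ (input_str : String), Dom_convert_task_id_gsde input_str → Spec_convert_task_id_gsde input_str (convert_task_id_gsde input_str)

-- ===== LEMMAS AND PROOFS =====

-- per-character contribution at positions ≥ 1 (both programs produce this there)
def pvG (c : Char) : List Char :=
  if PySem.Chars.isupper c then ['-', PySem.Chars.lowerChar c] else [c]

-- A's loop over positions ≥ 1 appends the per-character pieces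
theorem pvA_tail (cs : List Char) : ∀ (s : Int), 1 ≤ s → ∀ (acc : List Char),
    (PySem.List.enumerate cs s).foldl
      (fun acc p =>
        if PySem.Chars.isupper p.2 then
          (if p.1 ≠ 0 then acc ++ ['-'] else acc) ++ [PySem.Chars.lowerChar p.2]
        else acc ++ [p.2]) acc = acc ++ cs.flatMap pvG := by
  induction cs with
  | nil => intro s hs acc; simp [PySem.List.enumerate_nil]
  | cons c rest ih =>
    intro s hs acc
    rw [PySem.List.enumerate_cons, List.foldl_cons, ih (s+1) (by omega)]
    have hs0 : s ≠ 0 := by omega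
    by_cases h : PySem.Chars.isupper c <;> simp [h, hs0, pvG]

theorem pvJoin_cons (x : List Char) (xs : List (List Char)) :
    PySem.Chars.join ['-'] (x :: xs) = x ++ xs.flatMap (fun y => '-' :: y) := by
  induction xs generalizing x with
  | nil => simp [PySem.Chars.join, List.intercalate]
  | cons y ys ih =>
    simp only [PySem.Chars.join, List.intercalate, List.intersperse] at *
    simp [ih y]

-- appending a new segment appends '-' ++ segment to the join
theorem pvJoin_snoc (xs : List (List Char)) (y : List Char) (h : xs ≠ []) :
    PySem.Chars.join ['-'] (xs ++ [y]) = PySem.Chars.join ['-'] xs ++ '-' :: y := by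
  cases xs with
  | nil => exact absurd rfl h
  | cons a t => rw [List.cons_append, pvJoin_cons, pvJoin_cons, List.flatMap_append]; simp

-- extending the last segment extends the join
theorem pvJoin_last (xs : List (List Char)) (y z : List Char) :
    PySem.Chars.join ['-'] (xs ++ [y ++ z]) = PySem.Chars.join ['-'] (xs ++ [y]) ++ z := by
  cases xs with
  | nil => simp [pvJoin_cons]
  | cons a t =>
    rw [List.cons_append, List.cons_append, pvJoin_cons, pvJoin_cons,
        List.flatMap_append, List.flatMap_append]
    simp

theorem pvTf_cons (c : Char) (t : List Char) :
    pvTf (c :: t) = PySem.Chars.lowerChar c :: t := by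
  simp [pvTf, PySem.List.slice_to _ (by omega : (0:Int) ≤ 1),
        PySem.List.slice_from _ (by omega : (0:Int) ≤ 1), PySem.Chars.lower]

-- B's loop invariant: with a nonempty current segment, folding the rest appends the pieces
theorem pvB_inv (cs : List Char) : ∀ (segs : List (List Char)) (d : Char) (t : List Char),
    PySem.Chars.join ['-']
        (((cs.foldl pvStep (segs, d :: t)).1 ++ [(cs.foldl pvStep (segs, d :: t)).2]).map pvTf)
      = PySem.Chars.join ['-'] ((segs ++ [d :: t]).map pvTf) ++ cs.flatMap pvG := by
  induction cs with
  | nil => intro segs d t; simp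
  | cons c rest ih =>
    intro segs d t
    by_cases h : PySem.Chars.isupper c
    · rw [List.foldl_cons]
      show PySem.Chars.join ['-'] (((rest.foldl pvStep (pvStep (segs, d :: t) c)).1 ++ [(rest.foldl pvStep (pvStep (segs, d :: t) c)).2]).map pvTf) = _
      rw [show pvStep (segs, d :: t) c = (segs ++ [d :: t], [c]) by simp [pvStep, h]]
      rw [ih (segs ++ [d :: t]) c []]
      rw [List.map_append, show List.map pvTf [[c]] = [pvTf [c]] from rfl,
          pvJoin_snoc _ _ (by simp)]
      simp [pvTf_cons, pvG, h, List.map_append]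
    · rw [List.foldl_cons]
      rw [show pvStep (segs, d :: t) c = (segs, d :: (t ++ [c])) by simp [pvStep, h]]
      rw [ih segs d (t ++ [c])]
      have : (segs ++ [d :: (t ++ [c])]).map pvTf = segs.map pvTf ++ [pvTf (d :: t) ++ [c]] := by
        simp [List.map_append, pvTf_cons]
      rw [this, pvJoin_last]
      simp [pvG, h, List.map_append]

-- ===== VERDICT (by name: the statement is the Claim_ definition above) =====
theorem convert_task_id_gsde_spec : Claim_equal_convert_task_id_gsde := by
  intro input_str _
  unfold Spec_convert_task_id_gsde convert_task_id_gsde convert_task_id_gsde_alt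
  cases hcs : input_str.toList with
  | nil => simp [PySem.List.enumerate_nil, PySem.Chars.slice, PySem.List.slice, pvTf,
      PySem.Chars.join, List.intercalate, PySem.Chars.lower]
  | cons c rest =>
    rw [PySem.List.enumerate_cons, List.foldl_cons, show (0:Int) + 1 = 1 from rfl,
        pvA_tail rest 1 (by omega)]
    simp only [PySem.Chars.slice, PySem.List.slice_to _ (by omega : (0:Int) ≤ 1),
      PySem.List.slice_from _ (by omega : (0:Int) ≤ 1), Int.toNat_one, List.take_succ_cons,
      List.take_zero, List.drop_succ_cons, List.drop_zero]
    rw [pvB_inv rest [] c []]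
    have h1 : PySem.Chars.join ['-'] (([] ++ [[c]]).map pvTf) = [PySem.Chars.lowerChar c] := by
      simp [pvTf_cons, pvJoin_cons]
    rw [h1]
    by_cases h : PySem.Chars.isupper c
    · simp [h]
    · simp [h, PySem.Chars.lowerChar]
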